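-- pv_equiv track=rewrite | github.com/Ciro-Taranto/tsp_exercise | algorithms/genetic.py | _add_pos_neg
-- ===== SOURCE A (Python) =====
-- def _add_pos_neg(visits):
--     """
--     Create the positive/negative dictionaries
--     """
--     negatives = [{}, {}]
--     positives = [{}, {}]
--     for key, val in visits.items():
--         for i,v in enumerate(val):
--             if v > 0:
--                 positives[i][key] = v
--             elif v < 0:
--                 negatives[i][key] = v
--     return negatives[0], positives[0], negatives[1], positives[1]
-- ===== SOURCE B (Python) =====
-- def _add_pos_neg(visits):
--     """
--     Create the positive/negative dictionaries
--     """
--     neg0 = {k: v[0] for k, v in visits.items() if len(v) > 0 and v[0] < 0}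
--     pos0 = {k: v[0] for k, v in visits.items() if len(v) > 0 and v[0] > 0}
--     neg1 = {k: v[1] for k, v in visits.items() if len(v) > 1 and v[1] < 0}
--     pos1 = {k: v[1] for k, v in visits.items() if len(v) > 1 and v[1] > 0}
--     return neg0, pos0, neg1, pos1
-- ===== Notes on version B (the rewrite author's own statement) =====
-- stated objective: simpler
-- what changed: Replaces the single fused loop that mutates a list-of-dicts indexed by enumerate with four independent length-guarded dict comprehensions, one per returned dictionary.
import Mathlib
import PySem

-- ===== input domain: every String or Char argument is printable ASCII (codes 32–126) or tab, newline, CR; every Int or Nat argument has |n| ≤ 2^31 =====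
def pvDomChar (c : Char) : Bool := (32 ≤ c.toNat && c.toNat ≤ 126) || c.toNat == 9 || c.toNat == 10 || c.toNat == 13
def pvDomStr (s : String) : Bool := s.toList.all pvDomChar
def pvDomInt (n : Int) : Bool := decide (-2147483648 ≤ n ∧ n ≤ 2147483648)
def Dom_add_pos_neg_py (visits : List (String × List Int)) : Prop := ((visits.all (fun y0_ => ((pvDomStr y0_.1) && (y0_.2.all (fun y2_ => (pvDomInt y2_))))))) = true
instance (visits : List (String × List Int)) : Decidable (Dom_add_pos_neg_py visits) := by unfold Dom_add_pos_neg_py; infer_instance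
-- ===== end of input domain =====

-- B replaces A's fused loop over enumerate(val) mutating a list-of-dicts with four
-- independent length-guarded dict comprehensions (objective: simpler decomposition).

-- ===== PORT A =====
-- inner loop: 'for i, v in enumerate(val)'; List.set is a no-op out of range — the
-- inputs where Python would raise IndexError (i ≥ 2 with v ≠ 0) are excluded by Pre_.
def pvInnerA (key : String) :
    List Int → Nat →
    (List (PySem.Dict String Int) × List (PySem.Dict String Int)) →
    List (PySem.Dict String Int) × List (PySem.Dict String Int)
  | [], _, st => st
  | v :: rest, i, st =>
    pvInnerA key rest (i + 1)
      (if v > 0 then (st.1, st.2.set i ((st.2.getD i (PySem.Dict.mk [])).insert key v))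
       else if v < 0 then (st.1.set i ((st.1.getD i (PySem.Dict.mk [])).insert key v), st.2)
       else st)

def pvOuterA :
    List (String × List Int) →
    (List (PySem.Dict String Int) × List (PySem.Dict String Int)) →
    List (PySem.Dict String Int) × List (PySem.Dict String Int)
  | [], st => st
  | kv :: rest, st => pvOuterA rest (pvInnerA kv.1 kv.2 0 st)

def add_pos_neg_py (visits : List (String × List Int)) : (List (String × Int)) × (List (String × Int)) × (List (String × Int)) × (List (String × Int)) :=
  let st := pvOuterA visits ([PySem.Dict.mk [], PySem.Dict.mk []], [PySem.Dict.mk [], PySem.Dict.mk []])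
  ((st.1.getD 0 (PySem.Dict.mk [])).items, (st.2.getD 0 (PySem.Dict.mk [])).items,
   (st.1.getD 1 (PySem.Dict.mk [])).items, (st.2.getD 1 (PySem.Dict.mk [])).items)

-- ===== PORT B =====
-- one dict comprehension '{k: v[i] for k, v in visits.items() if len(v) > i and p(v[i])}';
-- the guard 'i < length' makes getD exact for Python's v[i].
def pvStep (i : Nat) (p : Int → Bool) (d : PySem.Dict String Int) (kv : String × List Int) : PySem.Dict String Int :=
  if i < kv.2.length ∧ p (kv.2.getD i 0) = true then d.insert kv.1 (kv.2.getD i 0) else d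

def pvDictComp (visits : List (String × List Int)) (i : Nat) (p : Int → Bool) : PySem.Dict String Int :=
  visits.foldl (pvStep i p) (PySem.Dict.mk [])

def add_pos_neg_py_alt (visits : List (String × List Int)) : (List (String × Int)) × (List (String × Int)) × (List (String × Int)) × (List (String × Int)) :=
  ((pvDictComp visits 0 (· < 0)).items, (pvDictComp visits 0 (0 < ·)).items,
   (pvDictComp visits 1 (· < 0)).items, (pvDictComp visits 1 (0 < ·)).items)

-- ===== PRECONDITION & SPEC =====
-- Pre_ excludes exactly the inputs where A raises IndexError: some value list has a
-- nonzero element at index ≥ 2 (A then indexes positives[i]/negatives[i], i ≥ 2).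
def Pre_add_pos_neg_py (visits : List (String × List Int)) : Prop :=
  ∀ kv ∈ visits, ∀ x ∈ kv.2.drop 2, x = (0 : Int)
instance (visits : List (String × List Int)) : Decidable (Pre_add_pos_neg_py visits) := by unfold Pre_add_pos_neg_py; infer_instance

def pvWitness_add_pos_neg_py : (List (String × List Int)) := [("a", [3, -2]), ("b", [-1, 0]), ("c", [])]

def Spec_add_pos_neg_py (visits : List (String × List Int)) (out : (List (String × Int)) × (List (String × Int)) × (List (String × Int)) × (List (String × Int))) : Prop := out = add_pos_neg_py_alt visits
instance (visits : List (String × List Int)) (out : (List (String × Int)) × (List (String × Int)) × (List (String × Int)) × (List (String × Int))) : Decidable (Spec_add_pos_neg_py visits out) := by unfold Spec_add_pos_neg_py; infer_instance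

-- ===== CLAIM (what is proved, stated in full; the proofs are below) =====
def Claim_equal_add_pos_neg_py : Prop := ∀ (visits : List (String × List Int)), Dom_add_pos_neg_py visits → Pre_add_pos_neg_py visits → Spec_add_pos_neg_py visits (add_pos_neg_py visits)

-- ===== LEMMAS AND PROOFS =====

-- entries that are zero trigger neither branch: the inner loop ignores them
lemma pvInnerA_zeros (key : String) :
    ∀ (l : List Int), (∀ x ∈ l, x = (0 : Int)) → ∀ (i : Nat) st,
      pvInnerA key l i st = st := by
  intro l
  induction l with
  | nil => intro _ i st; rfl
  | cons v rest ih =>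
    intro h i st
    have hv : v = 0 := h v (List.mem_cons_self ..)
    simp [pvInnerA, hv]
    exact ih (fun x hx => h x (List.mem_cons_of_mem _ hx)) (i + 1) st

-- one pass of A's inner loop equals one step of each of B's four comprehensions
lemma pvInnerA_eval (key : String) (val : List Int)
    (h : ∀ x ∈ val.drop 2, x = (0 : Int)) (n0 n1 p0 p1 : PySem.Dict String Int) :
    pvInnerA key val 0 ([n0, n1], [p0, p1]) =
      ([pvStep 0 (· < 0) n0 (key, val), pvStep 1 (· < 0) n1 (key, val)],
       [pvStep 0 (0 < ·) p0 (key, val), pvStep 1 (0 < ·) p1 (key, val)]) := by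
  match val with
  | [] => simp [pvInnerA, pvStep]
  | [a] =>
    rcases lt_trichotomy a 0 with h|h|h
    · simp [pvInnerA, pvStep, h, not_lt_of_gt h]
    · simp [pvInnerA, pvStep, h]
    · simp [pvInnerA, pvStep, h, not_lt_of_gt h]
  | a :: b :: rest =>
    have hrest : ∀ x ∈ rest, x = (0 : Int) := by simpa using h
    rcases lt_trichotomy a 0 with ha|ha|ha <;> rcases lt_trichotomy b 0 with hb|hb|hb
    · simp [pvInnerA, pvStep, pvInnerA_zeros key rest hrest, ha, hb, not_lt_of_gt ha, not_lt_of_gt hb]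
    · simp [pvInnerA, pvStep, pvInnerA_zeros key rest hrest, ha, hb, not_lt_of_gt ha]
    · simp [pvInnerA, pvStep, pvInnerA_zeros key rest hrest, ha, hb, not_lt_of_gt ha, not_lt_of_gt hb]
    · simp [pvInnerA, pvStep, pvInnerA_zeros key rest hrest, ha, hb, not_lt_of_gt hb]
    · simp [pvInnerA, pvStep, pvInnerA_zeros key rest hrest, ha, hb]
    · simp [pvInnerA, pvStep, pvInnerA_zeros key rest hrest, ha, hb, not_lt_of_gt hb]
    · simp [pvInnerA, pvStep, pvInnerA_zeros key rest hrest, ha, hb, not_lt_of_gt ha, not_lt_of_gt hb]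
    · simp [pvInnerA, pvStep, pvInnerA_zeros key rest hrest, ha, hb, not_lt_of_gt ha]
    · simp [pvInnerA, pvStep, pvInnerA_zeros key rest hrest, ha, hb, not_lt_of_gt ha, not_lt_of_gt hb]

-- the fused fold equals the four independent folds, for arbitrary accumulators
lemma pvOuterA_eval :
    ∀ (visits : List (String × List Int)),
      (∀ kv ∈ visits, ∀ x ∈ kv.2.drop 2, x = (0 : Int)) →
      ∀ (n0 n1 p0 p1 : PySem.Dict String Int),
        pvOuterA visits ([n0, n1], [p0, p1]) =
          ([visits.foldl (pvStep 0 (· < 0)) n0, visits.foldl (pvStep 1 (· < 0)) n1],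
           [visits.foldl (pvStep 0 (0 < ·)) p0, visits.foldl (pvStep 1 (0 < ·)) p1]) := by
  intro visits
  induction visits with
  | nil => intro _ n0 n1 p0 p1; rfl
  | cons kv rest ih =>
    intro h n0 n1 p0 p1
    have hkv : ∀ x ∈ kv.2.drop 2, x = (0 : Int) := h kv (List.mem_cons_self ..)
    have hrest : ∀ kv' ∈ rest, ∀ x ∈ kv'.2.drop 2, x = (0 : Int) :=
      fun kv' hm => h kv' (List.mem_cons_of_mem _ hm)
    show pvOuterA rest (pvInnerA kv.1 kv.2 0 ([n0, n1], [p0, p1])) = _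
    rw [pvInnerA_eval kv.1 kv.2 hkv, ih hrest]
    rfl

-- ===== VERDICT (by name: the statement is the Claim_ definition above) =====
theorem add_pos_neg_py_spec : Claim_equal_add_pos_neg_py := by
  intro visits _ hpre
  show add_pos_neg_py visits = add_pos_neg_py_alt visits
  unfold add_pos_neg_py add_pos_neg_py_alt pvDictComp
  rw [pvOuterA_eval visits hpre]
  rfl
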